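-- pv_equiv track=rewrite | github.com/includeno/DataModelBuildeV2 | backend/security.py | _remove_sql_string_literals
-- ===== SOURCE A (Python) =====
-- def _remove_sql_string_literals(query: str) -> str:
--     result: list[str] = []
--     i = 0
--     in_single = False
--     in_double = False
--     while i < len(query):
--         ch = query[i]
--         if ch == "'" and not in_double:
--             in_single = not in_single
--             result.append(" ")
--             i += 1
--             continue
--         if ch == '"' and not in_single:
--             in_double = not in_double
--             result.append(" ")
--             i += 1
--             continue
--         result.append(" " if in_single or in_double else ch)
--         i += 1
--     return "".join(result)
-- ===== SOURCE B (Python) =====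
-- def _remove_sql_string_literals(query: str) -> str:
--     out = []
--     i = 0
--     n = len(query)
--     while i < n:
--         ch = query[i]
--         if ch == "'" or ch == '"':
--             j = query.find(ch, i + 1)
--             end = n if j == -1 else j + 1
--             out.append(" " * (end - i))
--             i = end
--         else:
--             out.append(ch)
--             i += 1
--     return "".join(out)
-- ===== Notes on version B (the rewrite author's own statement) =====
-- stated objective: simpler
-- what changed: Replaces A's per-character state machine with in_single/in_double flags by a segment scan: at each quote, str.find locates the matching close, the whole literal (quotes included) is blanked to an equal-length run of spaces in one step (unterminated literals blank to end-of-string), non-quote text is copied.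
import Mathlib
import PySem

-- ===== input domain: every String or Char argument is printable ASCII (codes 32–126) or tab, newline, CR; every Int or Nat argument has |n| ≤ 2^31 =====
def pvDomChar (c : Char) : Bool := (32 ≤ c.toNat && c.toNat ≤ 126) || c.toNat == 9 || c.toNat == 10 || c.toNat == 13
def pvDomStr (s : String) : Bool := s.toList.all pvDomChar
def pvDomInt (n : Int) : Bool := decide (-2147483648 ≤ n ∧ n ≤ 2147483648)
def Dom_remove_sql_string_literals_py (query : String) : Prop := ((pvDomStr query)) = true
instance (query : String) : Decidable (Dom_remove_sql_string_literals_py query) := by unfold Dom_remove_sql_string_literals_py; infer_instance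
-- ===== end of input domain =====

-- B blanks SQL string literals by jumping from opening quote to its matching close with find,
-- instead of A's per-character flag state machine (objective: simpler; no speed claim).


-- ===== PORT A =====
-- A's while loop over indices with in_single/in_double flags, as structural recursion
-- over the character list carrying the same two flags.
def pvLoopA : List Char → Bool → Bool → List Char
  | [], _, _ => []
  | c :: rest, s, d =>
    if c = '\'' && !d then ' ' :: pvLoopA rest (!s) d
    else if c = '"' && !s then ' ' :: pvLoopA rest s (!d)
    else (if s || d then ' ' else c) :: pvLoopA rest s d

def remove_sql_string_literals_py (query : String) : String :=
  String.ofList (pvLoopA query.toList false false)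

-- ===== PORT B =====
-- B's segment scan: at a quote, find the matching close (takeWhile/drop = str.find),
-- emit an equal-length run of spaces and continue after it.
def pvLoopB : List Char → List Char
  | [] => []
  | c :: rest =>
    if c = '\'' || c = '"' then
      let seg := rest.takeWhile (· ≠ c)
      match h : rest.drop seg.length with
      | [] => List.replicate (seg.length + 1) ' '
      | _ :: tail => List.replicate (seg.length + 2) ' ' ++ pvLoopB tail
    else
      c :: pvLoopB rest
  termination_by xs => xs.length
  decreasing_by
    · have h1 : tail.length + 1 = (rest.drop seg.length).length := by rw [h]; simp
      have h2 : (rest.drop seg.length).length ≤ rest.length := by simp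
      simp; omega
    · simp

def remove_sql_string_literals_py_alt (query : String) : String :=
  String.ofList (pvLoopB query.toList)

-- ===== PRECONDITION & SPEC =====
def Spec_remove_sql_string_literals_py (query : String) (out : String) : Prop := out = remove_sql_string_literals_py_alt query
instance (query : String) (out : String) : Decidable (Spec_remove_sql_string_literals_py query out) := by unfold Spec_remove_sql_string_literals_py; infer_instance

-- ===== CLAIM (what is proved, stated in full; the proofs are below) =====
def Claim_equal_remove_sql_string_literals_py : Prop := ∀ (query : String), Dom_remove_sql_string_literals_py query → Spec_remove_sql_string_literals_py query (remove_sql_string_literals_py query)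

-- ===== LEMMAS AND PROOFS =====

-- Inside a literal opened by quote q, A blanks every character until it meets q again,
-- then toggles back to the ground state.
theorem pvLoopA_in_quote (q : Char) (hq : q = '\'' ∨ q = '"') :
    ∀ xs : List Char,
      pvLoopA xs (q = '\'') (q = '"') =
        List.replicate (xs.takeWhile (· ≠ q)).length ' ' ++
          (match xs.drop (xs.takeWhile (· ≠ q)).length with
           | [] => []
           | _ :: tail => ' ' :: pvLoopA tail false false) := by
  intro xs
  induction xs with
  | nil => simp [pvLoopA]
  | cons c rest ih =>
    by_cases hc : c = q
    · subst hc
      rcases hq with h | h <;> subst h <;>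
        simp [pvLoopA, List.takeWhile]
    · have hstep : pvLoopA (c :: rest) (q = '\'') (q = '"') =
          ' ' :: pvLoopA rest (q = '\'') (q = '"') := by
        rcases hq with h | h <;> subst h <;>
          simp [pvLoopA, hc]
      rw [hstep, ih]
      simp [List.takeWhile, hc, List.replicate_succ]

theorem pvLoopA_eq_pvLoopB : ∀ xs : List Char, pvLoopA xs false false = pvLoopB xs := by
  intro xs
  induction hL : xs.length using Nat.strong_induction_on generalizing xs with
  | _ n ih =>
    match xs with
    | [] => simp [pvLoopA, pvLoopB]
    | c :: rest =>
      by_cases hq : c = '\'' ∨ c = '"'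
      · have hA : pvLoopA (c :: rest) false false =
            ' ' :: pvLoopA rest (c = '\'') (c = '"') := by
          rcases hq with h | h <;> subst h <;> simp [pvLoopA]
        rw [hA, pvLoopA_in_quote c hq rest]
        have hqb : (c = '\'' || c = '"') = true := by
          rcases hq with h | h <;> simp [h]
        rw [pvLoopB]
        simp only [hqb, if_true]
        set seg := rest.takeWhile (· ≠ c) with hseg
        match hdrop : rest.drop seg.length with
        | [] =>
          simp [List.replicate_succ]
        | y :: tail =>
          have htail : tail.length < n := by
            have h1 : tail.length + 1 = (rest.drop seg.length).length := by
              rw [hdrop]; simp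
            have h2 : (rest.drop seg.length).length ≤ rest.length := by simp
            subst hL; simp; omega
          simp only [List.replicate_succ]
          simp only [ih tail.length htail tail rfl]
          rw [List.append_cons, ← List.replicate_succ', List.replicate_succ]
          simp
      · rw [not_or] at hq
        have hA : pvLoopA (c :: rest) false false = c :: pvLoopA rest false false := by
          simp [pvLoopA, hq.1, hq.2]
        have hB : pvLoopB (c :: rest) = c :: pvLoopB rest := by
          rw [pvLoopB]; simp [hq.1, hq.2]
        rw [hA, hB, ih rest.length (by subst hL; simp) rest rfl]

-- ===== VERDICT (by name: the statement is the Claim_ definition above) =====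
theorem remove_sql_string_literals_py_spec : Claim_equal_remove_sql_string_literals_py := by
  intro query _
  unfold Spec_remove_sql_string_literals_py remove_sql_string_literals_py remove_sql_string_literals_py_alt
  rw [pvLoopA_eq_pvLoopB]
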